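-- pv_equiv track=rewrite | github.com/Multu/vps | level0/lesson13/main.py | UFO
-- ===== SOURCE A (Python) =====
-- def convert_to_decimal(number, base):
--     decimal_value = 0
--
--     multiplier = 0
--     while number > 0:
--         rest = number % 10
--         decimal_value += (rest * (base ** multiplier))
--         multiplier += 1
--         number = number // 10
--
--     return decimal_value
--
-- def UFO(n, data, octal):
--     decimal_list = []
--
--     if octal:
--         base = 8
--     else:
--         base = 16
--
--     for i in range(n):
--         decimal_list.append(convert_to_decimal(data[i], base))
--
--     return decimal_list
-- ===== SOURCE B (Python) =====
-- def UFO(n, data, octal):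
--     base = 8 if octal else 16
--
--     def conv(num):
--         # Horner scheme over the decimal digits, most-significant first.
--         return 0 if num <= 0 else conv(num // 10) * base + num % 10
--
--     return [conv(x) for x in data[:max(n, 0)]]
-- ===== Notes on version B (the rewrite author's own statement) =====
-- stated objective: alternative
-- what changed: Per-number loop that recomputes base**multiplier for every digit is replaced by a recursive Horner scheme over the decimal digits (most-significant first), eliminating the exponentiation; the index loop becomes a comprehension over a slice.
import Mathlib
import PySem

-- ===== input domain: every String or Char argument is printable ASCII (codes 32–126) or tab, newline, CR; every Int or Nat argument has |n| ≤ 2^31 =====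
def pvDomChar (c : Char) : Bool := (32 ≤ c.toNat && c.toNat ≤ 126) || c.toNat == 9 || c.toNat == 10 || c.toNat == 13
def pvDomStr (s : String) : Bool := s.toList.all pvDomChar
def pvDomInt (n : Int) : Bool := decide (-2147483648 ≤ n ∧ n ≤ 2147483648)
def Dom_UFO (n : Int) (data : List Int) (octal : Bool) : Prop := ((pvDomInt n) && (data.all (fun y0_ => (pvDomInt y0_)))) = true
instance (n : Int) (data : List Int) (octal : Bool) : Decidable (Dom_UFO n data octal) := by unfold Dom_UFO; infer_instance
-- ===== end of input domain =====

-- B replaces A's per-digit base**multiplier powering with a recursive Horner scheme over the decimal digits (most-significant first); alternative algorithm, same observed cost.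

-- ===== PORT A =====
-- while number > 0: rest = number % 10; decimal_value += rest * base**multiplier; multiplier += 1; number //= 10
def convGoA (base decimal_value multiplier number : Int) : Int :=
  if _h : number > 0 then
    convGoA base (decimal_value + (PySem.Int.mod number 10) * base ^ multiplier.toNat)
      (multiplier + 1) (PySem.Int.floordiv number 10)
  else decimal_value
termination_by number.toNat
decreasing_by
  simp only [PySem.Int.floordiv_eq_ediv_of_pos (by norm_num : (0:Int) < 10)]
  omega

def convertToDecimal (number base : Int) : Int := convGoA base 0 0 number

def UFO (n : Int) (data : List Int) (octal : Bool) : List Int :=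
  let base : Int := if octal then 8 else 16
  (PySem.List.pyRange 0 n 1).foldl
    (fun acc i => acc ++ [convertToDecimal (PySem.List.pyGetD data i 0) base]) []

-- ===== PORT B =====
def hornerB (base num : Int) : Int :=
  if _h : num ≤ 0 then 0
  else hornerB base (PySem.Int.floordiv num 10) * base + PySem.Int.mod num 10
termination_by num.toNat
decreasing_by
  simp only [PySem.Int.floordiv_eq_ediv_of_pos (by norm_num : (0:Int) < 10)]
  omega

def UFO_alt (n : Int) (data : List Int) (octal : Bool) : List Int :=
  let base : Int := if octal then 8 else 16
  (PySem.List.slice data none (some (max n 0))).map (hornerB base)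

-- ===== PRECONDITION & SPEC =====
-- A raises IndexError when n exceeds len(data); exactly those inputs are excluded.
def Pre_UFO (n : Int) (data : List Int) (octal : Bool) : Prop := n ≤ data.length
instance (n : Int) (data : List Int) (octal : Bool) : Decidable (Pre_UFO n data octal) := by
  unfold Pre_UFO; infer_instance

def pvWitness_UFO : Int × List Int × Bool := (3, [123, 0, 45], true)

def Spec_UFO (n : Int) (data : List Int) (octal : Bool) (out : List Int) : Prop := out = UFO_alt n data octal
instance (n : Int) (data : List Int) (octal : Bool) (out : List Int) : Decidable (Spec_UFO n data octal out) := by unfold Spec_UFO; infer_instance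

-- ===== CLAIM (what is proved, stated in full; the proofs are below) =====
def Claim_equal_UFO : Prop := ∀ (n : Int) (data : List Int) (octal : Bool), Dom_UFO n data octal → Pre_UFO n data octal → Spec_UFO n data octal (UFO n data octal)

-- ===== LEMMAS AND PROOFS =====

-- the loop with accumulator (dv, m) computes dv + base^m * Horner(number)
theorem convGoA_eq (base dv m number : Int) :
    0 ≤ m → convGoA base dv m number = dv + base ^ m.toNat * hornerB base number := by
  fun_induction convGoA base dv m number with
  | case1 dv m number h ih =>
      intro hm
      rw [ih (by omega)]
      conv_rhs => rw [hornerB]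
      simp only [dif_neg (by omega : ¬ number ≤ 0)]
      have hm1 : (m + 1).toNat = m.toNat + 1 := by omega
      rw [hm1, pow_succ]
      ring
  | case2 dv m number h =>
      intro hm
      conv_rhs => rw [hornerB]
      simp only [dif_pos (by omega : number ≤ 0)]
      ring

theorem convertToDecimal_eq (number base : Int) :
    convertToDecimal number base = hornerB base number := by
  have := convGoA_eq base 0 0 number (le_refl 0)
  simpa [convertToDecimal] using this

theorem UFO_spec : Claim_equal_UFO := by
  intro n data octal _hdom hpre
  unfold Spec_UFO UFO UFO_alt
  simp only [convertToDecimal_eq]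
  by_cases hn : n ≤ 0
  · have h1 : PySem.List.pyRange 0 n 1 = [] := by
      simp [PySem.List.pyRange]; omega
    have h2 : max n 0 = (0 : Int) := by omega
    rw [h1, h2, PySem.List.slice_to data (by norm_num : (0:Int) ≤ 0)]
    simp
  · obtain ⟨N, hN⟩ : ∃ N : Nat, n = (N : Int) := ⟨n.toNat, by omega⟩
    subst hN
    have hmax : max (N : Int) 0 = (N : Int) := by omega
    rw [hmax, PySem.List.slice_to_natCast]
    rw [PySem.List.pyRange_zero_natCast]
    rw [PySem.List.foldl_append_singleton_eq_map]
    have hlen : N ≤ data.length := by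
      unfold Pre_UFO at hpre; omega
    apply List.ext_getElem
    · simp [hlen]
    · intro k hk1 hk2
      have hk1' : k < N := by simpa using hk1
      have hkd : k < data.length := lt_of_lt_of_le hk1' hlen
      simp only [List.nil_append, List.map_map, List.getElem_map, Function.comp,
        List.getElem_range, List.getElem_take]
      congr 1
      rw [PySem.List.pyGetD_natCast]
      simp [List.getD, hkd]

-- ===== VERDICT (by name: the statement is the Claim_ definition above) =====
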